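-- pv_equiv track=rewrite | github.com/pouiee/get_in_the-robot_shinji | main.py | list_of_dictionaries_to_dictionary_of_lists
-- ===== SOURCE A (Python) =====
-- def list_of_dictionaries_to_dictionary_of_lists(pilot_tests):
--     # this will be the final returned dictionary
--     dictionary_of_results = {}
--
--     # loop through the dictionaries in list provided
--     for dictionary in pilot_tests:
--         # loop through the keys and values in a dictionary
--         for key, value in dictionary.items():
--             # if the key value pair match up and the key is not already in the dictionary,
--             # add key value pair to the dictionary
--             if dictionary[key] == value and key not in dictionary_of_results.keys():
--                 dictionary_of_results[key] = [value]
--             # if the pair exists and the value is not already in the key list, append to key value(s)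
--             elif dictionary[key] == value and value not in dictionary_of_results[key]:
--                 dictionary_of_results[key].append(value)
--
--     # return the newly formed dictionary composed of {pilot : compatible mech(s)}
--     return dictionary_of_results
-- ===== SOURCE B (Python) =====
-- def list_of_dictionaries_to_dictionary_of_lists(pilot_tests):
--     # Phase 1: collect every value under its key, duplicates and all.
--     collected = {}
--     for dictionary in pilot_tests:
--         for key, value in dictionary.items():
--             collected.setdefault(key, []).append(value)
--     # Phase 2: dedup each value list, keeping first-occurrence order.
--     return {key: list(dict.fromkeys(values)) for key, values in collected.items()}
-- ===== Notes on version B (the rewrite author's own statement) =====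
-- stated objective: simpler
-- what changed: Replaces A's inline conditional insert/append logic (with redundant dictionary[key]==value checks and membership tests against the partially built result) by two plain phases: collect all values per key unconditionally, then dedup each list with dict.fromkeys preserving first-occurrence order.
import Mathlib
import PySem

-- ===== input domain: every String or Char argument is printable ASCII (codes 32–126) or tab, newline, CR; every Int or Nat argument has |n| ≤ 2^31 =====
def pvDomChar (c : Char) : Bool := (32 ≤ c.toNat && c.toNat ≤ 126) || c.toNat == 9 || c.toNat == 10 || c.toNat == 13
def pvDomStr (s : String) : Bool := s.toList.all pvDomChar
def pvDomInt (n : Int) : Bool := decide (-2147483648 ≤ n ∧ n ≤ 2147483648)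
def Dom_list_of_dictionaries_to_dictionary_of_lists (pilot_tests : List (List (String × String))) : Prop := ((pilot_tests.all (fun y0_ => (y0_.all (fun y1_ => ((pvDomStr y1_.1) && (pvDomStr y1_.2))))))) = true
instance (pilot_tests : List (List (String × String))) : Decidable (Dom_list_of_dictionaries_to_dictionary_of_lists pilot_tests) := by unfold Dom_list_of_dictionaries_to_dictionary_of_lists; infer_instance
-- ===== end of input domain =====

-- B replaces A's inline conditional insert/append by two phases: collect all values per key, then dedup each list (objective: simpler).
-- Pre_ excludes association lists in which some inner dict has duplicate keys: those do not encode a Python dict, so A's behaviour on them is not defined by the source.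
-- ===== PORT A =====
def list_of_dictionaries_to_dictionary_of_lists (pilot_tests : List (List (String × String))) : List (String × List String) :=
  (pilot_tests.foldl (fun dictionary_of_results dictionary =>
      dictionary.foldl (fun dictionary_of_results kv =>
        if (PySem.Dict.mk dictionary).get? kv.1 = some kv.2 ∧ kv.1 ∉ dictionary_of_results.keys then
          dictionary_of_results.insert kv.1 [kv.2]
        else if (PySem.Dict.mk dictionary).get? kv.1 = some kv.2 ∧ kv.2 ∉ dictionary_of_results.getD kv.1 [] then
          dictionary_of_results.modify kv.1 [] (fun l => l ++ [kv.2])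
        else dictionary_of_results) dictionary_of_results)
    PySem.Dict.empty).items

-- ===== PORT B =====
def list_of_dictionaries_to_dictionary_of_lists_alt (pilot_tests : List (List (String × String))) : List (String × List String) :=
  let collected : PySem.Dict String (List String) :=
    pilot_tests.foldl (fun collected dictionary =>
      dictionary.foldl (fun collected kv =>
        collected.modify kv.1 [] (fun l => l ++ [kv.2])) collected)
    PySem.Dict.empty
  collected.items.map (fun p => (p.1, PySem.List.dedup p.2))

-- ===== PRECONDITION & SPEC =====
-- Pre_: every inner association list has pairwise-distinct keys (it encodes a Python dict); lists with duplicate keys do not arise from Python dicts.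
def Pre_list_of_dictionaries_to_dictionary_of_lists (pilot_tests : List (List (String × String))) : Prop :=
  ∀ d ∈ pilot_tests, (d.map Prod.fst).Nodup
instance (pilot_tests : List (List (String × String))) : Decidable (Pre_list_of_dictionaries_to_dictionary_of_lists pilot_tests) := by unfold Pre_list_of_dictionaries_to_dictionary_of_lists; infer_instance
def pvWitness_list_of_dictionaries_to_dictionary_of_lists : (List (List (String × String))) :=
  [[("a", "x"), ("b", "y")], [("a", "z"), ("c", "z")]]
def Spec_list_of_dictionaries_to_dictionary_of_lists (pilot_tests : List (List (String × String))) (out : List (String × List String)) : Prop := out = list_of_dictionaries_to_dictionary_of_lists_alt pilot_tests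
instance (pilot_tests : List (List (String × String))) (out : List (String × List String)) : Decidable (Spec_list_of_dictionaries_to_dictionary_of_lists pilot_tests out) := by unfold Spec_list_of_dictionaries_to_dictionary_of_lists; infer_instance

-- ===== CLAIM (what is proved, stated in full; the proofs are below) =====
def Claim_equal_list_of_dictionaries_to_dictionary_of_lists : Prop := ∀ (pilot_tests : List (List (String × String))), Dom_list_of_dictionaries_to_dictionary_of_lists pilot_tests → Pre_list_of_dictionaries_to_dictionary_of_lists pilot_tests → Spec_list_of_dictionaries_to_dictionary_of_lists pilot_tests (list_of_dictionaries_to_dictionary_of_lists pilot_tests)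

-- ===== LEMMAS AND PROOFS =====
-- `mapDD d` is the dict d with every value list deduped (first occurrences kept).
def mapDD (d : PySem.Dict String (List String)) : PySem.Dict String (List String) :=
  PySem.Dict.mk (d.items.map (fun p => (p.1, PySem.List.dedup p.2)))

lemma get?_mapDD (d : PySem.Dict String (List String)) (k : String) :
    (mapDD d).get? k = (d.get? k).map PySem.List.dedup := by
  obtain ⟨l⟩ := d
  induction l with
  | nil => rfl
  | cons p rest ih =>
    obtain ⟨a, b⟩ := p
    simp only [mapDD, List.map_cons] at *
    rw [PySem.Dict.get?_mk_cons, PySem.Dict.get?_mk_cons]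
    by_cases h : (a == k) = true
    · rw [if_pos h, if_pos h]; rfl
    · rw [if_neg h, if_neg h]; exact ih

lemma keys_mapDD (d : PySem.Dict String (List String)) : (mapDD d).keys = d.keys := by
  obtain ⟨l⟩ := d
  simp [mapDD, PySem.Dict.keys]

lemma ofList_append_singleton (xs : List String) (v : String) :
    PySem.Set.ofList (xs ++ [v]) = if v ∈ xs then PySem.Set.ofList xs else PySem.Set.ofList xs ++ [v] := by
  simp only [PySem.Set.ofList_append, PySem.Set.update_cons, PySem.Set.update_nil]
  by_cases h : v ∈ xs <;> simp [PySem.Set.add, PySem.Set.mem_ofList, h]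

lemma nodup_modify (acc : PySem.Dict String (List String)) (hnd : acc.keys.Nodup) (k v : String) :
    (acc.modify k [] (fun l => l ++ [v])).keys.Nodup :=
  PySem.Dict.nodup_keys_insert acc k _ hnd

lemma mapDD_modify (acc : PySem.Dict String (List String)) (hnd : acc.keys.Nodup) (k v : String) :
    mapDD (acc.modify k [] (fun l => l ++ [v])) =
      if k ∉ (mapDD acc).keys then (mapDD acc).insert k [v]
      else if v ∉ (mapDD acc).getD k [] then (mapDD acc).modify k [] (fun l => l ++ [v])
      else mapDD acc := by
  have hmod : acc.modify k [] (fun l => l ++ [v]) = acc.insert k (acc.getD k [] ++ [v]) := rfl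
  by_cases hk : k ∈ acc.keys
  · -- key already present: look up its value list vs
    have hc : acc.contains k = true := (PySem.Dict.contains_iff_mem_keys acc k).mpr hk
    obtain ⟨vs, hvs⟩ : ∃ vs, acc.get? k = some vs := by
      rw [PySem.Dict.contains_eq_isSome_get?] at hc
      cases h : acc.get? k with
      | none => rw [h] at hc; simp at hc
      | some vs => exact ⟨vs, rfl⟩
    have hgdacc : acc.getD k [] = vs := PySem.Dict.getD_of_get?_eq_some acc [] hvs
    have hkm : k ∈ (mapDD acc).keys := by rw [keys_mapDD]; exact hk
    have hcm : (mapDD acc).contains k = true := (PySem.Dict.contains_iff_mem_keys (mapDD acc) k).mpr hkm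
    have hgd : (mapDD acc).getD k [] = PySem.List.dedup vs :=
      PySem.Dict.getD_of_get?_eq_some (mapDD acc) [] (by rw [get?_mapDD, hvs]; rfl)
    have hval : ∀ p ∈ acc.items, (p.1 == k) = true → p.2 = vs := by
      intro p hp hpk
      have h1 : acc.get? p.1 = some p.2 := PySem.Dict.get?_of_mem_items acc hp hnd
      have h2 : p.1 = k := by simpa using hpk
      rw [h2, hvs] at h1
      exact (Option.some.injEq _ _).mp h1.symm
    by_cases hv : v ∈ vs
    · -- value already collected: A leaves the dict unchanged, dedup swallows the duplicate
      have hvd : v ∈ (mapDD acc).getD k [] := by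
        rw [hgd]; exact (PySem.List.mem_dedup vs v).mpr hv
      rw [if_neg (by simpa using hkm), if_neg (by simpa using hvd)]
      apply PySem.Dict.ext
      rw [hmod, hgdacc]
      show ((acc.insert k (vs ++ [v])).items.map (fun p => (p.1, PySem.List.dedup p.2)))
          = acc.items.map (fun p => (p.1, PySem.List.dedup p.2))
      rw [PySem.Dict.items_insert_of_contains acc (vs ++ [v]) hc, List.map_map]
      apply List.map_congr_left
      intro p hp
      by_cases hpk : (p.1 == k) = true
      · have h2 : p.1 = k := by simpa using hpk
        simp [h2, hval p hp hpk, ofList_append_singleton, hv]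
      · have h2 : p.1 ≠ k := by simpa using hpk
        simp [h2]
    · -- new value for an existing key: both sides append it
      have hvd : v ∉ (mapDD acc).getD k [] := by
        rw [hgd]; exact fun h => hv ((PySem.List.mem_dedup vs v).mp h)
      rw [if_neg (by simpa using hkm), if_pos hvd]
      apply PySem.Dict.ext
      rw [hmod, hgdacc]
      show ((acc.insert k (vs ++ [v])).items.map (fun p => (p.1, PySem.List.dedup p.2)))
          = ((mapDD acc).insert k ((mapDD acc).getD k [] ++ [v])).items
      rw [hgd, PySem.Dict.items_insert_of_contains acc (vs ++ [v]) hc,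
        PySem.Dict.items_insert_of_contains (mapDD acc) (PySem.List.dedup vs ++ [v]) hcm]
      show _ = ((acc.items.map (fun p => (p.1, PySem.List.dedup p.2))).map
        (fun p => if p.1 == k then (k, PySem.List.dedup vs ++ [v]) else p))
      rw [List.map_map, List.map_map]
      apply List.map_congr_left
      intro p hp
      by_cases hpk : (p.1 == k) = true
      · have h2 : p.1 = k := by simpa using hpk
        simp [h2, ofList_append_singleton, hv]
      · have h2 : p.1 ≠ k := by simpa using hpk
        simp [h2]
  · -- fresh key: both sides append a singleton entry at the end
    have hc : acc.contains k = false := by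
      cases h : acc.contains k with
      | false => rfl
      | true => exact absurd ((PySem.Dict.contains_iff_mem_keys acc k).mp h) hk
    have hkm : k ∉ (mapDD acc).keys := by rw [keys_mapDD]; exact hk
    have hcm : (mapDD acc).contains k = false := by
      cases h : (mapDD acc).contains k with
      | false => rfl
      | true => exact absurd ((PySem.Dict.contains_iff_mem_keys (mapDD acc) k).mp h) hkm
    rw [if_pos hkm]
    apply PySem.Dict.ext
    rw [hmod, PySem.Dict.getD_of_not_contains acc [] hc]
    show ((acc.insert k ([] ++ [v])).items.map (fun p => (p.1, PySem.List.dedup p.2)))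
        = ((mapDD acc).insert k [v]).items
    rw [PySem.Dict.items_insert_of_not_contains acc ([] ++ [v]) hc,
      PySem.Dict.items_insert_of_not_contains (mapDD acc) [v] hcm]
    show _ = acc.items.map (fun p => (p.1, PySem.List.dedup p.2)) ++ [(k, [v])]
    rw [List.map_append]
    rfl

-- A's step, for a pair whose lookup in the enclosing dict matches, is dedup of B's step.
lemma step_eq (dictionary : List (String × String)) (acc : PySem.Dict String (List String))
    (hnd : acc.keys.Nodup) (k v : String)
    (hget : (PySem.Dict.mk dictionary).get? k = some v) :
    (if (PySem.Dict.mk dictionary).get? k = some v ∧ k ∉ (mapDD acc).keys then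
        (mapDD acc).insert k [v]
      else if (PySem.Dict.mk dictionary).get? k = some v ∧ v ∉ (mapDD acc).getD k [] then
        (mapDD acc).modify k [] (fun l => l ++ [v])
      else mapDD acc)
      = mapDD (acc.modify k [] (fun l => l ++ [v])) := by
  rw [mapDD_modify acc hnd k v]
  by_cases h1 : k ∉ (mapDD acc).keys <;> by_cases h2 : v ∉ (mapDD acc).getD k [] <;>
    simp [hget, h1, h2]

lemma inner_fold (dictionary : List (String × String)) (l : List (String × String))
    (hsub : ∀ kv ∈ l, (PySem.Dict.mk dictionary).get? kv.1 = some kv.2) :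
    ∀ acc : PySem.Dict String (List String), acc.keys.Nodup →
    l.foldl (fun dor kv =>
        if (PySem.Dict.mk dictionary).get? kv.1 = some kv.2 ∧ kv.1 ∉ dor.keys then
          dor.insert kv.1 [kv.2]
        else if (PySem.Dict.mk dictionary).get? kv.1 = some kv.2 ∧ kv.2 ∉ dor.getD kv.1 [] then
          dor.modify kv.1 [] (fun s => s ++ [kv.2])
        else dor) (mapDD acc)
      = mapDD (l.foldl (fun c kv => c.modify kv.1 [] (fun s => s ++ [kv.2])) acc) := by
  induction l with
  | nil => intro acc _; rfl
  | cons kv rest ih =>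
    intro acc hnd
    have hget := hsub kv (by simp)
    simp only [List.foldl_cons]
    rw [step_eq dictionary acc hnd kv.1 kv.2 hget]
    exact ih (fun p hp => hsub p (by simp [hp])) _ (nodup_modify acc hnd kv.1 kv.2)

lemma outer_fold (pts : List (List (String × String)))
    (hpre : ∀ d ∈ pts, (d.map Prod.fst).Nodup) :
    ∀ acc : PySem.Dict String (List String), acc.keys.Nodup →
    pts.foldl (fun dor dictionary =>
        dictionary.foldl (fun dor kv =>
          if (PySem.Dict.mk dictionary).get? kv.1 = some kv.2 ∧ kv.1 ∉ dor.keys then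
            dor.insert kv.1 [kv.2]
          else if (PySem.Dict.mk dictionary).get? kv.1 = some kv.2 ∧ kv.2 ∉ dor.getD kv.1 [] then
            dor.modify kv.1 [] (fun s => s ++ [kv.2])
          else dor) dor) (mapDD acc)
      = mapDD (pts.foldl (fun c dictionary =>
          dictionary.foldl (fun c kv => c.modify kv.1 [] (fun s => s ++ [kv.2])) c) acc) := by
  induction pts with
  | nil => intro acc _; rfl
  | cons d rest ih =>
    intro acc hnd
    simp only [List.foldl_cons]
    rw [inner_fold d d
      (fun kv hkv => PySem.Dict.get?_of_mem_items (PySem.Dict.mk d) hkv (hpre d (by simp)))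
      acc hnd]
    exact ih (fun d' hd' => hpre d' (by simp [hd'])) _
      (PySem.Dict.nodup_keys_foldl_modify_key d Prod.fst [] (fun _ kv => fun s => s ++ [kv.2]) acc hnd)

-- ===== VERDICT (by name: the statement is the Claim_ definition above) =====
theorem list_of_dictionaries_to_dictionary_of_lists_spec : Claim_equal_list_of_dictionaries_to_dictionary_of_lists := by
  intro pts _ hpre
  unfold Spec_list_of_dictionaries_to_dictionary_of_lists
  unfold list_of_dictionaries_to_dictionary_of_lists list_of_dictionaries_to_dictionary_of_lists_alt
  have h := outer_fold pts hpre PySem.Dict.empty (by simp)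
  have hemp : mapDD PySem.Dict.empty = PySem.Dict.empty := rfl
  rw [hemp] at h
  rw [h]
  rfl
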